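-- pv_equiv track=rewrite | github.com/hy5guy/Master_Automation | scripts/debug_verification.py | classify_overtime_category
-- ===== SOURCE A (Python) =====
-- def classify_overtime_category(pay_type: str):
--     """Classify overtime transaction as OT or COMP and extract rate."""
--     pay_type = str(pay_type).lower()
--
--     # COMP detection
--     if any(term in pay_type for term in ['comp', 'compensatory', 'ct']):
--         if '2.5' in pay_type or '250%' in pay_type:
--             return 'COMP', '25'
--         elif '2.0' in pay_type or '200%' in pay_type or 'double' in pay_type:
--             return 'COMP', '20'
--         elif '1.5' in pay_type or '150%' in pay_type:
--             return 'COMP', '15'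
--         elif '1.0' in pay_type or '100%' in pay_type:
--             return 'COMP', '10'
--         return 'COMP', ''
--
--     # OT detection
--     ot_terms = ['overtime', 'o.t.', 'o/t', 'dt', 'double time', 'doubletime']
--     if any(term in pay_type for term in ot_terms):
--         if '2.5' in pay_type or '250%' in pay_type:
--             return 'OT', '25'
--         elif '2.0' in pay_type or '200%' in pay_type or 'double' in pay_type or 'dt' in pay_type:
--             return 'OT', '20'
--         elif '1.5' in pay_type or '150%' in pay_type:
--             return 'OT', '15'
--         return 'OT', '15'
--
--     # Cash with rate >= 1.5
--     if 'cash' in pay_type: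
--         if any(rate in pay_type for rate in ['1.5', '2.0', '2.5', '150%', '200%', '250%']):
--             if '2.5' in pay_type or '250%' in pay_type:
--                 return 'OT', '25'
--             elif '2.0' in pay_type or '200%' in pay_type:
--                 return 'OT', '20'
--             elif '1.5' in pay_type or '150%' in pay_type:
--                 return 'OT', '15'
--
--     return '', ''
-- ===== SOURCE B (Python) =====
-- # Different decomposition: instead of per-category branch cascades, first extract the
-- # numeric rate signal once (maximum rate marker present) plus 'double'/'dt' flags,
-- # then map each category's label/code from that number arithmetically.
-- RATE_MARKERS = ((25, ('2.5', '250%')), (20, ('2.0', '200%')),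
--                 (15, ('1.5', '150%')), (10, ('1.0', '100%')))
--
--
-- def classify_overtime_category(pay_type: str):
--     s = str(pay_type).lower()
--     r = max([v for v, ms in RATE_MARKERS if any(m in s for m in ms)], default=0)
--     dbl = 'double' in s
--     dt = 'dt' in s
--     if any(t in s for t in ('comp', 'compensatory', 'ct')):
--         if r < 20 and dbl:
--             r = 20
--         return 'COMP', (str(r) if r else '')
--     if any(t in s for t in ('overtime', 'o.t.', 'o/t', 'dt', 'double time', 'doubletime')):
--         if r < 20 and (dbl or dt):
--             r = 20
--         return 'OT', str(max(r, 15))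
--     if 'cash' in s and r >= 15:
--         return 'OT', str(r)
--     return '', ''
-- ===== Notes on version B (the rewrite author's own statement) =====
-- stated objective: alternative
-- what changed: Instead of three per-category branch cascades, B first extracts the numeric rate signal once (maximum rate marker present, as an Int, plus double/dt flags) and then derives each category's label and code from that number arithmetically.
import Mathlib
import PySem

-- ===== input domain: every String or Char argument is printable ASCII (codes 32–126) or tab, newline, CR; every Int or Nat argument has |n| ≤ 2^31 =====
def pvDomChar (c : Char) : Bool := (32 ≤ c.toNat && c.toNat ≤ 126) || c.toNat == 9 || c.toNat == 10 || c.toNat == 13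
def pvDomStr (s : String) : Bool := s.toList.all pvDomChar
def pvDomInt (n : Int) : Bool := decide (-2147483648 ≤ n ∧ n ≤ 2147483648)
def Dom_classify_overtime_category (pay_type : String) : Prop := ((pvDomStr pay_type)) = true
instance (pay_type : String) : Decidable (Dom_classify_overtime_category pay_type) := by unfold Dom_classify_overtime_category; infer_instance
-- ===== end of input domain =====

-- B extracts the numeric rate signal once (max rate marker present, plus double/dt flags)
-- and maps each category from that number, instead of A's per-category branch cascades (objective: simpler).

-- ===== PORT A =====
def classify_overtime_category (pay_type : String) : String × String :=
  let s := PySem.Str.lower pay_type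
  if ["comp", "compensatory", "ct"].any (fun t => PySem.Str.isIn t s) then
    if PySem.Str.isIn "2.5" s || PySem.Str.isIn "250%" s then ("COMP", "25")
    else if PySem.Str.isIn "2.0" s || PySem.Str.isIn "200%" s || PySem.Str.isIn "double" s then ("COMP", "20")
    else if PySem.Str.isIn "1.5" s || PySem.Str.isIn "150%" s then ("COMP", "15")
    else if PySem.Str.isIn "1.0" s || PySem.Str.isIn "100%" s then ("COMP", "10")
    else ("COMP", "")
  else if ["overtime", "o.t.", "o/t", "dt", "double time", "doubletime"].any (fun t => PySem.Str.isIn t s) then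
    if PySem.Str.isIn "2.5" s || PySem.Str.isIn "250%" s then ("OT", "25")
    else if PySem.Str.isIn "2.0" s || PySem.Str.isIn "200%" s || PySem.Str.isIn "double" s || PySem.Str.isIn "dt" s then ("OT", "20")
    else if PySem.Str.isIn "1.5" s || PySem.Str.isIn "150%" s then ("OT", "15")
    else ("OT", "15")
  else if PySem.Str.isIn "cash" s then
    if ["1.5", "2.0", "2.5", "150%", "200%", "250%"].any (fun r => PySem.Str.isIn r s) then
      if PySem.Str.isIn "2.5" s || PySem.Str.isIn "250%" s then ("OT", "25")
      else if PySem.Str.isIn "2.0" s || PySem.Str.isIn "200%" s then ("OT", "20")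
      else if PySem.Str.isIn "1.5" s || PySem.Str.isIn "150%" s then ("OT", "15")
      else ("", "")
    else ("", "")
  else ("", "")

-- ===== PORT B =====
-- RATE_MARKERS of Source B
def pvRateMarkers : List (Int × List String) :=
  [(25, ["2.5", "250%"]), (20, ["2.0", "200%"]), (15, ["1.5", "150%"]), (10, ["1.0", "100%"])]

def classify_overtime_category_alt (pay_type : String) : String × String :=
  let s := PySem.Str.lower pay_type
  -- max([v for v, ms in RATE_MARKERS if any(m in s for m in ms)], default=0)
  let r : Int := (((pvRateMarkers.filter (fun p => p.2.any (fun m => PySem.Str.isIn m s))).map Prod.fst).foldl max 0)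
  let dbl := PySem.Str.isIn "double" s
  let dt := PySem.Str.isIn "dt" s
  if ["comp", "compensatory", "ct"].any (fun t => PySem.Str.isIn t s) then
    let r := if r < 20 && dbl then 20 else r
    ("COMP", if r ≠ 0 then PySem.Int.toStr r else "")
  else if ["overtime", "o.t.", "o/t", "dt", "double time", "doubletime"].any (fun t => PySem.Str.isIn t s) then
    let r := if r < 20 && (dbl || dt) then 20 else r
    ("OT", PySem.Int.toStr (max r 15))
  else if PySem.Str.isIn "cash" s && decide (15 ≤ r) then
    ("OT", PySem.Int.toStr r)
  else ("", "")

-- ===== PRECONDITION & SPEC =====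
def Spec_classify_overtime_category (pay_type : String) (out : String × String) : Prop := out = classify_overtime_category_alt pay_type
instance (pay_type : String) (out : String × String) : Decidable (Spec_classify_overtime_category pay_type out) := by unfold Spec_classify_overtime_category; infer_instance

-- ===== CLAIM =====
def Claim_equal_classify_overtime_category : Prop := ∀ (pay_type : String), Dom_classify_overtime_category pay_type → Spec_classify_overtime_category pay_type (classify_overtime_category pay_type)

-- ===== LEMMAS AND PROOFS =====
-- Both programs depend on the lowered string only through finitely many substring tests;
-- after generalizing each test to a Boolean the goal is closed over 13 Booleans and decide settles it.
set_option maxHeartbeats 2000000 in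
theorem classify_overtime_category_spec : Claim_equal_classify_overtime_category := by
  intro pay_type _
  unfold Spec_classify_overtime_category classify_overtime_category classify_overtime_category_alt
  simp only [pvRateMarkers, List.any_cons, List.any_nil, Bool.or_false, List.filter_cons,
    List.filter_nil]
  generalize PySem.Str.lower pay_type = s
  generalize (PySem.Str.isIn "2.5" s) = b25a
  generalize (PySem.Str.isIn "250%" s) = b25b
  generalize (PySem.Str.isIn "2.0" s) = b20a
  generalize (PySem.Str.isIn "200%" s) = b20b
  generalize (PySem.Str.isIn "1.5" s) = b15a
  generalize (PySem.Str.isIn "150%" s) = b15b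
  generalize (PySem.Str.isIn "1.0" s) = b10a
  generalize (PySem.Str.isIn "100%" s) = b10b
  generalize (PySem.Str.isIn "double" s) = dbl
  generalize (PySem.Str.isIn "dt" s) = dt
  generalize (PySem.Str.isIn "cash" s) = cash
  generalize (PySem.Str.isIn "comp" s || (PySem.Str.isIn "compensatory" s || PySem.Str.isIn "ct" s)) = ccomp
  generalize (PySem.Str.isIn "overtime" s || (PySem.Str.isIn "o.t." s || (PySem.Str.isIn "o/t" s || (dt || (PySem.Str.isIn "double time" s || PySem.Str.isIn "doubletime" s))))) = cot
  revert b25a b25b b20a b20b b15a b15b b10a b10b dbl dt cash ccomp cot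
  decide
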